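-- pv_equiv track=rewrite | github.com/dekuNukem/duckyPad | pc_software/ds3/make_bytecode.py | get_partial_varname_addr
-- ===== SOURCE A (Python) =====
-- def get_partial_varname_addr(msg, vad):
-- 	if len(msg) == 0:
-- 		return None, None
-- 	for x in range(len(msg)+1):
-- 		partial_name = msg[:x]
-- 		if partial_name in vad:
-- 			return partial_name, vad[partial_name]
-- 	return None, None
-- ===== SOURCE B (Python) =====
-- def get_partial_varname_addr(msg, vad):
-- 	if len(msg) == 0:
-- 		return None, None
-- 	matches = [k for k in vad if msg.startswith(k)]
-- 	if len(matches) == 0: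
-- 		return None, None
-- 	k = min(matches, key=len)
-- 	return k, vad[k]
-- ===== Notes on version B (the rewrite author's own statement) =====
-- stated objective: alternative
-- what changed: Instead of scanning prefixes of msg in increasing length and testing each for dict membership, B filters vad's keys down to those that are prefixes of msg (startswith) and picks the minimum-length one with min(key=len); ties are impossible since equal-length prefixes of msg are equal.
import Mathlib
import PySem

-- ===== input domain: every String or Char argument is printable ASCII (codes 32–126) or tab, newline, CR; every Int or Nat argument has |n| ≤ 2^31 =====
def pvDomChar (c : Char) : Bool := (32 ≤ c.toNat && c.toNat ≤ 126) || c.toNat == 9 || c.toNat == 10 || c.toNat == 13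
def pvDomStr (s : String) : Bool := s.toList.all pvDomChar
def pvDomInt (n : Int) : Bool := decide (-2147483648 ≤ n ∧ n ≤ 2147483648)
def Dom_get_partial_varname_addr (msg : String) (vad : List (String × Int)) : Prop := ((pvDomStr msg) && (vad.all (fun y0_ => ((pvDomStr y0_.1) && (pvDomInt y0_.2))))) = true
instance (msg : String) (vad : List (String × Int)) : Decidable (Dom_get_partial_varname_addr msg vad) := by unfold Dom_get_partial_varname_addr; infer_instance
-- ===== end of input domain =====

-- B filters vad's keys to the prefixes of msg and takes the minimum-length one, instead of
-- scanning prefixes of msg in increasing length and testing each for membership (alternative decomposition).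

-- ===== PORT A =====
-- 'partial_name in vad' + 'vad[partial_name]' on the dict = first matching entry of the association list
def pvFindKV (vad : List (String × Int)) (p : List Char) : Option (String × Int) :=
  vad.find? (fun kv => kv.1 == String.ofList p)

-- 'for x in range(len(msg)+1): …' over the list of indices
def pvLoopA (cs : List Char) (vad : List (String × Int)) : List Nat → Option String × Option Int
  | [] => (none, none)
  | x :: rest =>
    match pvFindKV vad (cs.take x) with          -- partial_name = msg[:x]  (x ≥ 0, exact)
    | some kv => (some (String.ofList (cs.take x)), some kv.2)
    | none => pvLoopA cs vad rest

def get_partial_varname_addr (msg : String) (vad : List (String × Int)) : Option String × Option Int :=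
  if PySem.Str.len msg == 0 then (none, none)
  else pvLoopA msg.toList vad (List.range (msg.toList.length + 1))   -- range(len(msg)+1)

-- ===== PORT B =====
def get_partial_varname_addr_alt (msg : String) (vad : List (String × Int)) : Option String × Option Int :=
  if PySem.Str.len msg == 0 then (none, none)
  else
    let mats := (vad.map Prod.fst).filter (fun k => PySem.Str.startswith msg k)
    match PySem.List.min? mats (fun k => PySem.Str.len k) with   -- min(mats, key=len)
    | none => (none, none)
    | some k =>
      match vad.find? (fun kv => kv.1 == k) with                    -- vad[k]
      | some kv => (some k, some kv.2)
      | none => (none, none)                                        -- unreachable: k is a key of vad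

-- ===== PRECONDITION & SPEC =====
def Spec_get_partial_varname_addr (msg : String) (vad : List (String × Int)) (out : Option String × Option Int) : Prop := out = get_partial_varname_addr_alt msg vad
instance (msg : String) (vad : List (String × Int)) (out : Option String × Option Int) : Decidable (Spec_get_partial_varname_addr msg vad out) := by unfold Spec_get_partial_varname_addr; infer_instance

-- ===== CLAIM (what is proved, stated in full; the proofs are below) =====
def Claim_equal_get_partial_varname_addr : Prop := ∀ (msg : String) (vad : List (String × Int)), Dom_get_partial_varname_addr msg vad → Spec_get_partial_varname_addr msg vad (get_partial_varname_addr msg vad)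

-- ===== LEMMAS AND PROOFS =====

theorem pvLoopA_none (cs : List Char) (vad : List (String × Int)) (l : List Nat)
    (h : ∀ x ∈ l, pvFindKV vad (cs.take x) = none) : pvLoopA cs vad l = (none, none) := by
  induction l with
  | nil => rfl
  | cons x rest ih =>
    simp only [pvLoopA]
    rw [h x (by simp)]
    exact ih (fun y hy => h y (by simp [hy]))

theorem pvLoopA_first (cs : List Char) (vad : List (String × Int)) (l1 : List Nat) (x : Nat)
    (l2 : List Nat) (kv : String × Int) (h1 : ∀ y ∈ l1, pvFindKV vad (cs.take y) = none)
    (h2 : pvFindKV vad (cs.take x) = some kv) :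
    pvLoopA cs vad (l1 ++ x :: l2) = (some (String.ofList (cs.take x)), some kv.2) := by
  induction l1 with
  | nil => simp only [List.nil_append, pvLoopA]; rw [h2]
  | cons y rest ih =>
    simp only [List.cons_append, pvLoopA]
    rw [h1 y (by simp)]
    exact ih (fun z hz => h1 z (by simp [hz]))

-- a hit of A's scan at index y ≤ len(msg) is a key of vad that is a prefix of msg, of length y
theorem pvMemMats (msg : String) (vad : List (String × Int)) (y : Nat)
    (hy : y ≤ msg.toList.length) (kv : String × Int)
    (h : pvFindKV vad (msg.toList.take y) = some kv) :
    kv.1 ∈ (vad.map Prod.fst).filter (fun k => PySem.Str.startswith msg k) ∧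
      kv.1.toList.length = y := by
  unfold pvFindKV at h
  have hp := List.find?_some h
  have hmem := List.mem_of_find?_eq_some h
  have heq : kv.1 = String.ofList (msg.toList.take y) := by simpa using hp
  have htl : kv.1.toList = msg.toList.take y := by rw [heq, String.toList_ofList]
  refine ⟨List.mem_filter.mpr ⟨List.mem_map.mpr ⟨kv, hmem, rfl⟩, ?_⟩, ?_⟩
  · rw [PySem.Str.startswith_eq, PySem.Chars.startswith_iff, htl]
    exact List.take_prefix y msg.toList
  · rw [htl, List.length_take]; omega

theorem pvRangeSplit (i n : Nat) (h : i ≤ n) :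
    List.range n = List.range i ++ List.range' i (n - i) := by
  have hap := @List.range'_append 0 i (n - i) 1
  simp at hap
  rw [List.range_eq_range', List.range_eq_range', hap, Nat.add_sub_cancel' h]

-- ===== VERDICT (by name: the statement is the Claim_ definition above) =====
theorem get_partial_varname_addr_spec : Claim_equal_get_partial_varname_addr := by
  intro msg vad _
  unfold Spec_get_partial_varname_addr get_partial_varname_addr get_partial_varname_addr_alt
  by_cases h0 : msg.length = 0
  · simp [PySem.Str.len_eq, h0]
  · have hlen : (PySem.Str.len msg == 0) = false := by
      simp only [PySem.Str.len_eq, beq_eq_false_iff_ne, ne_eq]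
      exact_mod_cast h0
    simp only [hlen, Bool.false_eq_true, if_false]
    cases hm : PySem.List.min? ((vad.map Prod.fst).filter (fun k => PySem.Str.startswith msg k))
        (fun k => PySem.Str.len k) with
    | none =>
      have hmats := (PySem.List.min?_eq_none_iff _ _).mp hm
      have hall : ∀ x ∈ List.range (msg.toList.length + 1),
          pvFindKV vad (msg.toList.take x) = none := by
        intro x hx
        cases hfx : pvFindKV vad (msg.toList.take x) with
        | none => rfl
        | some kv =>
          exfalso
          have hxle : x ≤ msg.toList.length := by
            have := List.mem_range.mp hx; omega
          have := (pvMemMats msg vad x hxle kv hfx).1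
          rw [hmats] at this
          exact List.not_mem_nil this
      rw [pvLoopA_none msg.toList vad _ hall]
    | some k =>
      have hkmem := PySem.List.min?_mem hm
      obtain ⟨hkkey, hsw⟩ := List.mem_filter.mp hkmem
      obtain ⟨kvw, hkvw, hfst⟩ := List.mem_map.mp hkkey
      have hpre : k.toList <+: msg.toList := by
        rw [PySem.Str.startswith_eq, PySem.Chars.startswith_iff] at hsw
        exact hsw
      have hx0 : k.toList.length ≤ msg.toList.length := hpre.length_le
      have htake : msg.toList.take k.toList.length = k.toList :=
        (List.prefix_iff_eq_take.mp hpre).symm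
      have hofl : String.ofList (msg.toList.take k.toList.length) = k := by
        rw [htake, String.ofList_toList]
      have hsome : (pvFindKV vad (msg.toList.take k.toList.length)).isSome := by
        unfold pvFindKV
        rw [List.find?_isSome]
        exact ⟨kvw, hkvw, by rw [hofl]; simp [hfst]⟩
      obtain ⟨kv, hkv⟩ := Option.isSome_iff_exists.mp hsome
      have hnone : ∀ y, y < k.toList.length → pvFindKV vad (msg.toList.take y) = none := by
        intro y hy
        cases hfy : pvFindKV vad (msg.toList.take y) with
        | none => rfl
        | some kv' =>
          exfalso
          obtain ⟨hmem', hlen'⟩ := pvMemMats msg vad y (by omega) kv' hfy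
          have hmin := PySem.List.min?_isMin hm kv'.1 hmem'
          simp only [PySem.Str.len_eq, hlen'] at hmin
          omega
      have hsplit : List.range (msg.toList.length + 1) =
          List.range k.toList.length ++ k.toList.length ::
            List.range' (k.toList.length + 1) (msg.toList.length - k.toList.length) := by
        rw [pvRangeSplit k.toList.length (msg.toList.length + 1) (by omega),
          show msg.toList.length + 1 - k.toList.length =
            (msg.toList.length - k.toList.length) + 1 by omega, List.range'_succ]
      rw [hsplit,
        pvLoopA_first msg.toList vad _ k.toList.length _ kv
          (fun y hy => hnone y (List.mem_range.mp hy)) hkv]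
      unfold pvFindKV at hkv
      rw [hofl] at hkv
      simp only [hkv, hofl]
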